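-- pv_equiv track=rewrite | github.com/bhaskar792/uPOWER-assembler-and-simulator | disassembler.py | buildTextMap
-- ===== SOURCE A (Python) =====
-- def buildTextMap(lines):
--     labelsMap = {}
--     count = 10000000
--     for lineNo, line in enumerate(lines):
--         split = line.split(':', 1)
--         if len(split) == 1:
--             label = split[0].strip()
--             labelsMap[count] = label
--             count = count + 4
--
--     return labelsMap
-- ===== SOURCE B (Python) =====
-- def buildTextMap(lines):
--     # Divide and conquer: each half is mapped independently; the right half's
--     # base address is offset by 4 * (number of labels found in the left half).
--     def go(ls, base):
--         if len(ls) == 0: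
--             return {}
--         if len(ls) == 1:
--             line = ls[0]
--             return {} if ':' in line else {base: line.strip()}
--         mid = len(ls) // 2
--         left = go(ls[:mid], base)
--         right = go(ls[mid:], base + 4 * len(left))
--         return {**left, **right}
--     return go(list(lines), 10000000)
-- ===== Notes on version B (the rewrite author's own statement) =====
-- stated objective: alternative
-- what changed: Replaces A's single forward pass with a threaded address counter by a divide-and-conquer recursion: the list is split in half, each half is mapped independently, the right half's base address is offset by 4 times the number of labels in the left half's map, and the two maps are merged.
import Mathlib
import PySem

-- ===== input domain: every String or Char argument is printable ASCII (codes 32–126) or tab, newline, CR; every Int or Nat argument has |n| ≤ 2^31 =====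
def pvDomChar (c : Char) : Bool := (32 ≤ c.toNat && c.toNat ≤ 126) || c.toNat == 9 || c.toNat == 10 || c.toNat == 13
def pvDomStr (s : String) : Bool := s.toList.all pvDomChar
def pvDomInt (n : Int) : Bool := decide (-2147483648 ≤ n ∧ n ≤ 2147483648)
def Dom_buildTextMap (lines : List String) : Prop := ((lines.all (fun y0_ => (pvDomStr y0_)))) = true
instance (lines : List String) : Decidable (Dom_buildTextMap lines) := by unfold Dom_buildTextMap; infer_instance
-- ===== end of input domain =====

-- B replaces A's single forward pass with a threaded address counter by a divide-and-conquer
-- recursion: map each half independently, offsetting the right half's base address by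
-- 4 * (number of labels in the left map), and merge (objective: alternative).

-- ===== PORT A =====
-- loop body of A: split on ':' (maxsplit 1); if len(split) == 1, insert stripped label at count, count += 4
def buildTextMapStep (st : PySem.Dict Int String × Int) (p : Int × String) :
    PySem.Dict Int String × Int :=
  let split := (PySem.Str.splitMax? p.2 ":" 1).getD []
  if split.length = 1 then
    (st.1.insert st.2 (PySem.Str.strip split.headI), st.2 + 4)
  else st

def buildTextMap (lines : List String) : List (Int × String) :=
  ((PySem.List.enumerate lines 0).foldl buildTextMapStep (PySem.Dict.empty, 10000000)).1.items

-- ===== PORT B =====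
-- go(ls, base) of Source B. ls[:mid] / ls[mid:] are PySem slices; {**left, **right} is append:
-- the two maps' key sets are disjoint (left uses base..base+4*(len-1), right starts at base+4*len).
def buildTextMapGo (ls : List String) (base : Int) : List (Int × String) :=
  if ls.length = 0 then []
  else if ls.length = 1 then
    let line := ls.headI
    if PySem.Str.isIn ":" line then [] else [(base, PySem.Str.strip line)]
  else
    let mid := ls.length / 2
    let left := buildTextMapGo (PySem.List.slice ls none (some (mid : Int))) base
    let right := buildTextMapGo (PySem.List.slice ls (some (mid : Int)) none) (base + 4 * left.length)
    left ++ right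
termination_by ls.length
decreasing_by
  · rw [PySem.List.slice_to_natCast]; simp only [List.length_take]; omega
  · rw [PySem.List.slice_from_natCast]; simp only [List.length_drop]; omega

def buildTextMap_alt (lines : List String) : List (Int × String) :=
  buildTextMapGo lines 10000000

-- ===== PRECONDITION & SPEC =====
def Spec_buildTextMap (lines : List String) (out : List (Int × String)) : Prop := out = buildTextMap_alt lines
instance (lines : List String) (out : List (Int × String)) : Decidable (Spec_buildTextMap lines out) := by unfold Spec_buildTextMap; infer_instance

-- ===== CLAIM (what is proved, stated in full; the proofs are below) =====
def Claim_equal_buildTextMap : Prop := ∀ (lines : List String), Dom_buildTextMap lines → Spec_buildTextMap lines (buildTextMap lines)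

-- ===== LEMMAS AND PROOFS =====

-- spine of both results: labels paired with addresses c, c+4, c+8, …
def pvAddr (c : Int) : List String → List (Int × String)
  | [] => []
  | x :: xs => (c, x) :: pvAddr (c + 4) xs

-- the stripped colon-free lines of a list
def pvLabels (ls : List String) : List String :=
  (ls.filter (fun line => !(PySem.Str.isIn ":" line))).map PySem.Str.strip

-- splitOnMax.go on a colon-free remainder just flushes
theorem pv_go_no_colon (fuel : Nat) : ∀ (m : Nat) (l cur : List Char) (acc : List (List Char)),
    (':' : Char) ∉ l →
    PySem.Chars.splitOnMax.go [':'] fuel m l cur acc = ((cur.reverse ++ l) :: acc).reverse := by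
  induction fuel with
  | zero => intro m l cur acc _; rfl
  | succ fuel ih =>
    intro m l cur acc hl
    cases l with
    | nil => simp [PySem.Chars.splitOnMax.go]
    | cons c rest =>
      have hc : c ≠ ':' := fun h => hl (h ▸ List.mem_cons_self)
      have hpre : List.isPrefixOf [':'] (c :: rest) = false := by
        simp [List.isPrefixOf]; exact fun h => hc h.symm
      by_cases hm : m = 0
      · subst hm; simp [PySem.Chars.splitOnMax.go]
      · rw [PySem.Chars.splitOnMax.go]
        simp only [hm, if_false, hpre, Bool.false_eq_true]
        rw [ih m rest (c :: cur) acc (fun h => hl (List.mem_cons_of_mem _ h))]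
        simp

-- splitOnMax.go with maxsplit exhausted flushes the remainder
theorem pv_go_zero (fuel : Nat) (l cur : List Char) (acc : List (List Char)) :
    PySem.Chars.splitOnMax.go [':'] fuel 0 l cur acc = ((cur.reverse ++ l) :: acc).reverse := by
  cases fuel with
  | zero => rfl
  | succ fuel => cases l with
    | nil => simp [PySem.Chars.splitOnMax.go]
    | cons c rest => rw [PySem.Chars.splitOnMax.go]; simp

-- a line containing ':' splits (maxsplit 1) into exactly two pieces
theorem pv_go_colon (fuel : Nat) : ∀ (l cur : List Char) (acc : List (List Char)),
    l.length < fuel → (':' : Char) ∈ l →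
    ∃ a b, PySem.Chars.splitOnMax.go [':'] fuel 1 l cur acc = acc.reverse ++ [a, b] := by
  induction fuel with
  | zero => intro l cur acc h _; omega
  | succ fuel ih =>
    intro l cur acc hlen hmem
    cases l with
    | nil => simp at hmem
    | cons c rest =>
      rw [PySem.Chars.splitOnMax.go]
      simp only [Nat.one_ne_zero, if_false]
      by_cases hc : c = ':'
      · subst hc
        have hpre : List.isPrefixOf [':'] (':' :: rest) = true := by simp [List.isPrefixOf]
        rw [hpre]
        simp only [if_true]
        refine ⟨cur.reverse, rest, ?_⟩
        rw [pv_go_zero]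
        simp [List.length_cons]
      · have hpre : List.isPrefixOf [':'] (c :: rest) = false := by
          simp [List.isPrefixOf]; exact fun h => (hc h.symm).elim
        rw [hpre]
        simp only [Bool.false_eq_true, if_false]
        have : (':' : Char) ∈ rest := by
          rcases List.mem_cons.mp hmem with h | h
          · exact absurd h.symm hc
          · exact h
        exact ih rest (c :: cur) acc (by simpa using Nat.lt_of_succ_lt_succ hlen) this

theorem pv_split_no_colon (l : String) (h : (':' : Char) ∉ l.toList) :
    (PySem.Str.splitMax? l ":" 1).getD [] = [l] := by
  simp [PySem.Str.splitMax?, PySem.Chars.splitMax?, PySem.Chars.splitOnMax]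
  rw [pv_go_no_colon _ _ _ _ _ h]
  exact ⟨l.toList, by simp, String.ofList_toList⟩

theorem pv_split_colon (l : String) (h : (':' : Char) ∈ l.toList) :
    ∃ a b, (PySem.Str.splitMax? l ":" 1).getD [] = [a, b] := by
  simp [PySem.Str.splitMax?, PySem.Chars.splitMax?, PySem.Chars.splitOnMax]
  obtain ⟨a, b, hab⟩ := pv_go_colon (l.length + 1) l.toList [] []
    (by have : l.toList.length = l.length := rfl; omega) h
  exact ⟨String.ofList a, String.ofList b, by rw [hab]; simp⟩

theorem pv_isIn_colon (l : String) :
    PySem.Str.isIn ":" l = false ↔ (':' : Char) ∉ l.toList := by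
  rw [PySem.Str.isIn_eq, PySem.Chars.isIn_eq_false_iff]
  rw [show (":" : String).toList = [':'] from rfl]
  constructor
  · intro h hm
    rcases List.mem_iff_append.mp hm with ⟨pre, suf, heq⟩
    exact h ⟨pre, suf, by rw [heq]; simp⟩
  · intro h hin
    rcases hin with ⟨pre, suf, heq⟩
    apply h
    rw [← heq]
    simp

-- the loop of A, started at any (d, c) with all existing keys below c,
-- appends exactly the addressed labels of the remaining lines
theorem pv_loop (ls : List String) : ∀ (s : Int) (d : PySem.Dict Int String) (c : Int),
    (∀ k ∈ d.keys, k < c) →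
    ((PySem.List.enumerate ls s).foldl buildTextMapStep (d, c)).1.items
      = d.items ++ pvAddr c (pvLabels ls) := by
  induction ls with
  | nil => intro s d c _; simp [PySem.List.enumerate, pvAddr, pvLabels]
  | cons l ls ih =>
    intro s d c hk
    rw [PySem.List.enumerate_cons, List.foldl_cons]
    by_cases hcol : PySem.Str.isIn ":" l = false
    · have hnot : (':' : Char) ∉ l.toList := (pv_isIn_colon l).mp hcol
      have hstep : buildTextMapStep (d, c) (s, l)
          = (d.insert c (PySem.Str.strip l), c + 4) := by
        simp only [buildTextMapStep, pv_split_no_colon l hnot]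
        rfl
      rw [hstep]
      have hcfree : d.contains c = false := by
        cases h : d.contains c
        · rfl
        · exact absurd (hk c ((PySem.Dict.contains_iff_mem_keys d c).mp h)) (by omega)
      rw [ih (s + 1) (d.insert c (PySem.Str.strip l)) (c + 4) ?_]
      · rw [PySem.Dict.items_insert_of_not_contains d _ hcfree]
        have hcolC : PySem.Chars.isIn [':'] l.toList = false := by
          rw [show ([':'] : List Char) = (":" : String).toList from rfl, ← PySem.Str.isIn_eq]
          exact hcol
        simp [pvLabels, hcolC, pvAddr]
      · intro k hkmem
        rw [PySem.Dict.keys_insert_of_not_contains d _ hcfree] at hkmem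
        rcases List.mem_append.mp hkmem with h | h
        · have := hk k h; omega
        · simp at h; omega
    · have hmem : (':' : Char) ∈ l.toList := by
        by_contra hn
        exact hcol ((pv_isIn_colon l).mpr hn)
      obtain ⟨a, b, hab⟩ := pv_split_colon l hmem
      have hstep : buildTextMapStep (d, c) (s, l) = (d, c) := by
        simp [buildTextMapStep, hab]
      rw [hstep, ih (s + 1) d c hk]
      have hcolC : PySem.Chars.isIn [':'] l.toList = true := by
        rw [show ([':'] : List Char) = (":" : String).toList from rfl, ← PySem.Str.isIn_eq]
        cases h : PySem.Str.isIn ":" l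
        · exact absurd h hcol
        · rfl
      simp [pvLabels, hcolC]

@[simp] theorem pvAddr_length (xs : List String) : ∀ c, (pvAddr c xs).length = xs.length := by
  induction xs with
  | nil => intro c; rfl
  | cons x xs ih => intro c; simp [pvAddr, ih]

theorem pvAddr_append (xs ys : List String) : ∀ (c : Int),
    pvAddr c (xs ++ ys) = pvAddr c xs ++ pvAddr (c + 4 * xs.length) ys := by
  induction xs with
  | nil => intro c; simp [pvAddr]
  | cons x xs ih =>
    intro c
    simp only [List.cons_append, pvAddr, ih (c + 4), List.length_cons]
    have : c + 4 + 4 * (xs.length : Int) = c + 4 * ((xs.length : Int) + 1) := by ring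
    rw [this]
    push_cast
    ring_nf

theorem pvLabels_append (xs ys : List String) :
    pvLabels (xs ++ ys) = pvLabels xs ++ pvLabels ys := by
  simp [pvLabels]

-- the divide-and-conquer recursion computes the addressed labels of its slice
theorem pv_go_eq (n : Nat) : ∀ (ls : List String) (base : Int), ls.length ≤ n →
    buildTextMapGo ls base = pvAddr base (pvLabels ls) := by
  induction n with
  | zero =>
    intro ls base h
    have : ls = [] := List.eq_nil_of_length_eq_zero (by omega)
    subst this
    rw [buildTextMapGo]
    simp [pvLabels, pvAddr]
  | succ n ih =>
    intro ls base h
    rw [buildTextMapGo]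
    by_cases h0 : ls.length = 0
    · have : ls = [] := List.eq_nil_of_length_eq_zero h0
      subst this
      simp [pvLabels, pvAddr]
    · simp only [h0, if_false]
      by_cases h1 : ls.length = 1
      · obtain ⟨l, hl⟩ := List.length_eq_one_iff.mp h1
        subst hl
        rw [if_pos h1]
        simp only [List.headI]
        by_cases hc : PySem.Str.isIn ":" l
        · rw [if_pos hc]
          simp only [pvLabels, List.filter_cons, hc, Bool.not_true, Bool.false_eq_true,
            if_false, List.filter_nil, List.map_nil]
          rfl
        · simp only [Bool.not_eq_true] at hc
          rw [if_neg (by rw [hc]; simp)]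
          simp only [pvLabels, List.filter_cons, hc, Bool.not_false, if_true,
            List.filter_nil, List.map_cons, List.map_nil]
          rfl
      · simp only [h1, if_false]
        rw [PySem.List.slice_to_natCast, PySem.List.slice_from_natCast]
        set mid := ls.length / 2 with hmid
        have hsplit : ls = ls.take mid ++ ls.drop mid := (List.take_append_drop mid ls).symm
        have hltake : (ls.take mid).length = mid := by
          rw [List.length_take]; omega
        have hldrop : (ls.drop mid).length = ls.length - mid := by
          rw [List.length_drop]
        rw [ih (ls.take mid) base (by omega),
            ih (ls.drop mid) _ (by omega)]
        rw [pvAddr_length]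
        conv_rhs => rw [hsplit]
        rw [pvLabels_append, pvAddr_append]

-- ===== VERDICT (by name: the statement is the Claim_ definition above) =====
theorem buildTextMap_spec : Claim_equal_buildTextMap := by
  intro lines _
  unfold Spec_buildTextMap buildTextMap buildTextMap_alt
  rw [pv_loop lines 0 PySem.Dict.empty 10000000 (by simp [PySem.Dict.keys_empty])]
  rw [pv_go_eq lines.length lines 10000000 le_rfl]
  simp [PySem.Dict.empty]
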